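-- pv_equiv track=rewrite | github.com/helloocc/algorithm | 1423_maximum-points-you-can-obtain-from-cards.py | maxScore2
-- ===== SOURCE A (Python) =====
-- from typing import List
--
-- def maxScore2(cardPoints: List[int], k: int) -> int:
--     """
--     逆向思维，求左右取得最大值，转化为个数为k的连续最小子数组
--     滑动窗口进行求值
--     """
--     lens = len(cardPoints)
--     if k == lens:
--         return sum(cardPoints)
--
--     cur = sum(cardPoints[:lens - k])
--     min_ = cur
--     l, r = 0, lens - k
--     while r < lens:
--         # 开始滑动窗口，每次左边滑出一个，右边滑进一个
--         cur = cur - cardPoints[l] + cardPoints[r]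
--         min_ = min(cur, min_)
--         l += 1
--         r += 1
--
--     return sum(cardPoints) - min_
-- ===== SOURCE B (Python) =====
-- from typing import List
--
-- def maxScore2(cardPoints: List[int], k: int) -> int:
--     n = len(cardPoints)
--     front = [0]
--     for x in cardPoints[:k]:
--         front.append(front[-1] + x)
--     back = [0]
--     for x in cardPoints[n - k:][::-1]:
--         back.append(back[-1] + x)
--     return max(front[i] + back[k - i] for i in range(k + 1))
-- ===== Notes on version B (the rewrite author's own statement) =====
-- stated objective: alternative
-- what changed: Replaces the sliding-window minimum over size-(n-k) subarrays by the direct split enumeration: prefix sums of the first i cards plus suffix sums of the last k-i cards, maximized over i in 0..k.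
-- outside the precondition, e.g. on maxScore2([1, 2, 3], -1): A returns 0, B raises ValueError
import Mathlib
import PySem

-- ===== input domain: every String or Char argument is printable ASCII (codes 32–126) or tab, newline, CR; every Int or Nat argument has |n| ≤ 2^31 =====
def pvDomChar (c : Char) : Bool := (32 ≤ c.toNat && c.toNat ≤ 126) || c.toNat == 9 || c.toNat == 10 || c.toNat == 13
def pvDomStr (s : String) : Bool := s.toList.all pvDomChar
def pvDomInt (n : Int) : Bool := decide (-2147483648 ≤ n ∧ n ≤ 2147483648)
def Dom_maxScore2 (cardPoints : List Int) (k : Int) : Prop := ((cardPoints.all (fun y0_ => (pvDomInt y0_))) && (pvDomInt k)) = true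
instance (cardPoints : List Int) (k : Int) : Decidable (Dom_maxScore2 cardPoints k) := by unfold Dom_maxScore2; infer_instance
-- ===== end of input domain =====

-- B replaces A's sliding-window minimum by a prefix/suffix split enumeration (same O(n) cost); equal return values on 0 ≤ k ≤ len(cardPoints).

-- ===== PORT A =====
-- while r < lens: cur = cur - cardPoints[l] + cardPoints[r]; min_ = min(cur, min_); l += 1; r += 1
def maxScore2.loop (cp : List Int) (lens cur min_ l r : Int) : Int :=
  if h : r < lens then
    let cur' := cur - (PySem.List.pyGet? cp l).getD 0 + (PySem.List.pyGet? cp r).getD 0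
    maxScore2.loop cp lens cur' (min cur' min_) (l + 1) (r + 1)
  else min_
termination_by (lens - r).toNat
decreasing_by omega

def maxScore2 (cardPoints : List Int) (k : Int) : Int :=
  let lens : Int := cardPoints.length
  if k = lens then cardPoints.sum
  else
    let cur := (PySem.List.slice cardPoints none (some (lens - k))).sum
    cardPoints.sum - maxScore2.loop cardPoints lens cur cur 0 (lens - k)

-- ===== PORT B =====
-- front.append(front[-1] + x)  /  back.append(back[-1] + x)
def pyAppendLast (f : List Int) (x : Int) : List Int :=
  f ++ [(PySem.List.pyGet? f (-1)).getD 0 + x]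

def maxScore2_alt (cardPoints : List Int) (k : Int) : Int :=
  let n : Int := cardPoints.length
  let front := (PySem.List.slice cardPoints none (some k)).foldl pyAppendLast [0]
  let back := ((PySem.List.slice cardPoints (some (n - k)) none).reverse).foldl pyAppendLast [0]
  (PySem.List.max?
    ((PySem.List.pyRange 0 (k + 1) 1).map
      (fun i => (PySem.List.pyGet? front i).getD 0 + (PySem.List.pyGet? back (k - i)).getD 0))
    (fun y => y)).getD 0

-- ===== PRECONDITION & SPEC =====
-- Pre_ excludes k outside 0..len(cardPoints): for k > len A raises IndexError, and for k < 0
-- A's returned 0 is an artefact of the degenerate window while B (max over an empty range) raises ValueError.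
def Pre_maxScore2 (cardPoints : List Int) (k : Int) : Prop :=
  0 ≤ k ∧ k ≤ cardPoints.length
instance (cardPoints : List Int) (k : Int) : Decidable (Pre_maxScore2 cardPoints k) := by
  unfold Pre_maxScore2; infer_instance

def pvWitness_maxScore2 : List Int × Int := ([1, 2, 3, 4], 2)

def Spec_maxScore2 (cardPoints : List Int) (k : Int) (out : Int) : Prop := out = maxScore2_alt cardPoints k
instance (cardPoints : List Int) (k : Int) (out : Int) : Decidable (Spec_maxScore2 cardPoints k out) := by unfold Spec_maxScore2; infer_instance

-- ===== CLAIM (what is proved, stated in full; the proofs are below) =====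
def Claim_equal_maxScore2 : Prop := ∀ (cardPoints : List Int) (k : Int), Dom_maxScore2 cardPoints k → Pre_maxScore2 cardPoints k → Spec_maxScore2 cardPoints k (maxScore2 cardPoints k)

-- ===== LEMMAS AND PROOFS =====

-- prefix sum of the first i elements
def Pfx (cp : List Int) (i : Nat) : Int := (cp.take i).sum

-- sum of the window of width w starting at i
def gwin (cp : List Int) (w i : Nat) : Int := Pfx cp (i + w) - Pfx cp i

-- running minimum of window sums over a list of start indices (A's loop, abstracted)
def Mfold (cp : List Int) (w : Nat) (m : Int) (l : List Nat) : Int :=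
  l.foldl (fun acc j => min (gwin cp w j) acc) m

-- running partial sums starting from s (B's append loop, abstracted)
def psums (s : Int) : List Int → List Int
  | [] => []
  | x :: xs => (s + x) :: psums (s + x) xs

lemma Pfx_succ (cp : List Int) (i : Nat) (h : i < cp.length) :
    Pfx cp (i + 1) = Pfx cp i + cp[i] := by
  exact List.sum_take_succ cp i h

lemma sum_drop_take (cp : List Int) (a b : Nat) :
    ((cp.drop a).take b).sum = Pfx cp (a + b) - Pfx cp a := by
  have h : cp.take (a + b) = cp.take a ++ (cp.drop a).take b := List.take_add ..
  simp [Pfx, h]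

lemma loop_eq (cp : List Int) (w : Nat) :
    ∀ (cnt l : Nat) (m : Int), l + w + cnt = cp.length →
      maxScore2.loop cp (cp.length : Int) (gwin cp w l) m (l : Int) ((l : Int) + (w : Int))
        = Mfold cp w m (List.range' (l + 1) cnt) := by
  intro cnt
  induction cnt with
  | zero =>
    intro l m h
    rw [maxScore2.loop]
    have : ¬ ((l : Int) + (w : Int) < (cp.length : Int)) := by omega
    simp [this, Mfold]
  | succ cnt ih =>
    intro l m h
    rw [maxScore2.loop]
    have hlt : ((l : Int) + (w : Int) < (cp.length : Int)) := by omega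
    have hl : l < cp.length := by omega
    have hlw : l + w < cp.length := by omega
    simp only [hlt, dite_true]
    have e1 : PySem.List.pyGet? cp (l : Int) = some cp[l] := by
      simp [PySem.List.pyGet?_natCast, List.getElem?_eq_getElem hl]
    have e2 : PySem.List.pyGet? cp ((l : Int) + (w : Int)) = some cp[l + w] := by
      rw [show ((l : Int) + (w : Int)) = ((l + w : Nat) : Int) by push_cast; ring,
        PySem.List.pyGet?_natCast, List.getElem?_eq_getElem hlw]
    have hcur : gwin cp w l - (PySem.List.pyGet? cp (l : Int)).getD 0
        + (PySem.List.pyGet? cp ((l : Int) + (w : Int))).getD 0 = gwin cp w (l + 1) := by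
      rw [e1, e2]
      have p1 := Pfx_succ cp l hl
      have p2 := Pfx_succ cp (l + w) hlw
      simp only [gwin, Option.getD_some]
      have : l + 1 + w = l + w + 1 := by omega
      rw [this, p2, p1]
      ring
    rw [hcur]
    have c1 : (l : Int) + 1 = ((l + 1 : Nat) : Int) := by push_cast; ring
    have c2 : (l : Int) + (w : Int) + 1 = (((l + 1 : Nat)) : Int) + (w : Int) := by push_cast; ring
    rw [c1, c2, ih (l + 1) (min (gwin cp w (l + 1)) m) (by omega)]
    rw [List.range'_succ]
    simp [Mfold]

lemma front_get (cp : List Int) (k' : Nat) (hk : k' ≤ cp.length) (i : Nat) (hi : i ≤ k') :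
    ((0 : Int) :: psums 0 (cp.take k'))[i]? = some (Pfx cp i) := by
  induction i with
  | zero => simp [Pfx]
  | succ j _ =>
    have hj : j < (cp.take k').length := by simp; omega
    rw [List.getElem?_cons_succ]
    have : ∀ (xs : List Int) (s : Int) (n : Nat), n < xs.length →
        (psums s xs)[n]? = some (s + (xs.take (n + 1)).sum) := by
      intro xs
      induction xs with
      | nil => intro s n h; simp at h
      | cons x xs ihx =>
        intro s n h
        cases n with
        | zero => simp [psums]
        | succ n =>
          simp only [psums, List.getElem?_cons_succ]
          rw [ihx (s + x) n (by simpa using h)]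
          simp [List.take_succ_cons]
          ring
    rw [this _ _ _ hj]
    have htt : (cp.take k').take (j + 1) = cp.take (j + 1) := by
      rw [List.take_take]
      congr 1
      omega
    rw [htt]
    simp [Pfx]

lemma foldl_pyAppendLast :
    ∀ (xs acc : List Int) (s : Int), (PySem.List.pyGet? acc (-1)).getD 0 = s → acc ≠ [] →
      xs.foldl pyAppendLast acc = acc ++ psums s xs := by
  intro xs
  induction xs with
  | nil => intro acc s _ _; simp [psums]
  | cons x xs ih =>
    intro acc s hs hne
    simp only [List.foldl_cons]
    have hstep : pyAppendLast acc x = acc ++ [s + x] := by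
      simp [pyAppendLast, hs]
    rw [hstep, ih (acc ++ [s + x]) (s + x)
      (by rw [PySem.List.pyGet?_neg_one_append_singleton]; rfl) (by simp)]
    simp [psums]

lemma foldl_max_duality (t : Int) (G : Nat → Int) :
    ∀ (l : List Nat) (a : Int),
      ((l.map (fun j => t - G j)).foldl max (t - a)) = t - l.foldl (fun acc j => min (G j) acc) a := by
  intro l
  induction l with
  | nil => intro a; simp
  | cons j l ih =>
    intro a
    simp only [List.map_cons, List.foldl_cons]
    rw [show max (t - a) (t - G j) = t - min (G j) a by omega, ih]

lemma back_get (cp : List Int) (k' : Nat) (hk : k' ≤ cp.length) (m : Nat) (hm : m ≤ k') :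
    ((0 : Int) :: psums 0 ((cp.drop (cp.length - k')).reverse))[m]? = some (cp.sum - Pfx cp (cp.length - m)) := by
  have hsuf : ∀ (j : Nat), j ≤ k' →
      (((cp.drop (cp.length - k')).reverse).take j).sum = cp.sum - Pfx cp (cp.length - j) := by
    intro j hj
    set suf := cp.drop (cp.length - k') with hsufdef
    have hlen : suf.length = k' := by simp [hsufdef]; omega
    have hrev : suf.reverse.take j = (suf.drop (k' - j)).reverse := by
      rw [List.take_reverse, hlen]
    rw [hrev, List.sum_reverse]
    have h1 : suf.sum = cp.sum - Pfx cp (cp.length - k') := by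
      have := List.take_append_drop (cp.length - k') cp
      have hs : cp.sum = (cp.take (cp.length - k')).sum + suf.sum := by
        conv_lhs => rw [← this]
        simp [hsufdef]
      simp only [Pfx]
      omega
    have h2 : (suf.drop (k' - j)).sum = suf.sum - (suf.take (k' - j)).sum := by
      have := List.take_append_drop (k' - j) suf
      have : suf.sum = (suf.take (k' - j)).sum + (suf.drop (k' - j)).sum := by
        conv_lhs => rw [← this]
        simp
      omega
    have h3 : (suf.take (k' - j)).sum = Pfx cp (cp.length - j) - Pfx cp (cp.length - k') := by
      rw [hsufdef, sum_drop_take]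
      congr 2
      omega
    rw [h2, h1, h3]
    ring_nf
  cases m with
  | zero =>
    have : Pfx cp cp.length = cp.sum := by simp [Pfx]
    simp [this]
  | succ j =>
    rw [List.getElem?_cons_succ]
    have hj : j < ((cp.drop (cp.length - k')).reverse).length := by
      simp
      omega
    have hps : ∀ (xs : List Int) (s : Int) (n : Nat), n < xs.length →
        (psums s xs)[n]? = some (s + (xs.take (n + 1)).sum) := by
      intro xs
      induction xs with
      | nil => intro s n h; simp at h
      | cons x xs ihx =>
        intro s n h
        cases n with
        | zero => simp [psums]
        | succ n =>
          simp only [psums, List.getElem?_cons_succ]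
          rw [ihx (s + x) n (by simpa using h)]
          simp [List.take_succ_cons]
          ring
    rw [hps _ _ _ hj, hsuf (j + 1) (by omega)]
    simp

lemma gwin_zero_start (cp : List Int) (w : Nat) : gwin cp w 0 = Pfx cp w := by
  simp [gwin, Pfx]

lemma Mfold_zero_width (cp : List Int) : ∀ (l : List Nat), Mfold cp 0 0 l = 0 := by
  intro l
  induction l with
  | nil => rfl
  | cons j l ih =>
    simp only [Mfold, List.foldl_cons] at *
    have : gwin cp 0 j = 0 := by simp [gwin]
    rw [this]
    simpa using ih

lemma alt_eq (cp : List Int) (k : Int) (hk0 : 0 ≤ k) (hkn : k ≤ (cp.length : Int)) :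
    maxScore2_alt cp k = cp.sum - Mfold cp (cp.length - k.toNat) (gwin cp (cp.length - k.toNat) 0) (List.range' 1 k.toNat) := by
  set k' : Nat := k.toNat with hk'
  set w : Nat := cp.length - k' with hw
  have hk'le : k' ≤ cp.length := by omega
  unfold maxScore2_alt
  simp only []
  rw [PySem.List.slice_to cp hk0,
      PySem.List.slice_from cp (by omega : (0:Int) ≤ (cp.length : Int) - k)]
  have hdrop : ((cp.length : Int) - k).toNat = cp.length - k' := by omega
  rw [hdrop]
  have hlast : (PySem.List.pyGet? [(0 : Int)] (-1)).getD 0 = 0 := by decide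
  rw [foldl_pyAppendLast (cp.take k.toNat) [0] 0 hlast (by simp),
      foldl_pyAppendLast ((cp.drop (cp.length - k')).reverse) [0] 0 hlast (by simp)]
  simp only [List.singleton_append]
  rw [PySem.List.pyRange_one 0 (k + 1)]
  have hcnt : ((k + 1) - 0).toNat = k' + 1 := by omega
  rw [hcnt, List.map_map]
  have hmap : (List.range (k' + 1)).map
      ((fun i => (PySem.List.pyGet? ((0 : Int) :: psums 0 (cp.take k.toNat)) i).getD 0 +
        (PySem.List.pyGet? ((0 : Int) :: psums 0 ((cp.drop (cp.length - k')).reverse)) (k - i)).getD 0) ∘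
        (fun j : Nat => (0 : Int) + (j : Int)))
      = (List.range (k' + 1)).map (fun j => cp.sum - gwin cp w j) := by
    apply List.map_congr_left
    intro j hj
    have hjle : j ≤ k' := by
      have := List.mem_range.mp hj
      omega
    simp only [Function.comp, zero_add]
    have htake : cp.take k.toNat = cp.take k' := by rw [hk']
    have e1 : (PySem.List.pyGet? ((0 : Int) :: psums 0 (cp.take k.toNat)) (j : Int)).getD 0 = Pfx cp j := by
      rw [htake, PySem.List.pyGet?_natCast, front_get cp k' hk'le j hjle]
      rfl
    have hcast : k - (j : Int) = ((k' - j : Nat) : Int) := by omega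
    have e2 : (PySem.List.pyGet? ((0 : Int) :: psums 0 ((cp.drop (cp.length - k')).reverse)) (k - (j : Int))).getD 0
        = cp.sum - Pfx cp (cp.length - (k' - j)) := by
      rw [hcast, PySem.List.pyGet?_natCast, back_get cp k' hk'le (k' - j) (by omega)]
      rfl
    rw [e1, e2]
    have hidx : cp.length - (k' - j) = j + w := by omega
    rw [hidx]
    simp only [gwin]
    ring
  rw [hmap]
  have hrange : List.range (k' + 1) = 0 :: List.range' 1 k' := by
    rw [List.range_eq_range', List.range'_succ]
  rw [hrange, List.map_cons, PySem.List.max?_id_cons, Option.getD_some]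
  have := foldl_max_duality cp.sum (gwin cp w) (List.range' 1 k') (gwin cp w 0)
  simpa [Mfold] using this

theorem maxScore2_spec_aux (cardPoints : List Int) (k : Int)
    (hpre : Pre_maxScore2 cardPoints k) :
    maxScore2 cardPoints k = maxScore2_alt cardPoints k := by
  obtain ⟨hk0, hkn⟩ := hpre
  rw [alt_eq cardPoints k hk0 hkn]
  by_cases h : k = (cardPoints.length : Int)
  · have hk' : k.toNat = cardPoints.length := by omega
    have hw : cardPoints.length - k.toNat = 0 := by omega
    rw [hw, hk']
    have hg : gwin cardPoints 0 0 = 0 := by simp [gwin]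
    rw [hg, Mfold_zero_width]
    simp [maxScore2, h]
  · unfold maxScore2
    simp only [if_neg h]
    rw [PySem.List.slice_to cardPoints (by omega : (0:Int) ≤ (cardPoints.length : Int) - k)]
    set w : Nat := cardPoints.length - k.toNat with hwdef
    have hcast1 : ((cardPoints.length : Int) - k).toNat = w := by omega
    rw [hcast1]
    have hsum : (cardPoints.take w).sum = gwin cardPoints w 0 := (gwin_zero_start cardPoints w).symm
    rw [hsum]
    have hc0 : (0 : Int) = ((0 : Nat) : Int) := rfl
    have hcr : (cardPoints.length : Int) - k = (((0 : Nat)) : Int) + (w : Int) := by omega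
    rw [hc0, hcr, loop_eq cardPoints w k.toNat 0 (gwin cardPoints w 0) (by omega)]

-- ===== VERDICT (by name: the statement is the Claim_ definition above) =====
theorem maxScore2_spec : Claim_equal_maxScore2 := by
  intro cardPoints k _ hpre
  exact maxScore2_spec_aux cardPoints k hpre
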